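-- pv_equiv track=rewrite | github.com/RescueDiver/arcs4 | reasoning/panel_pattern_rule_engine.py | split_into_row_bands
-- ===== SOURCE A (Python) =====
-- def grid_shape(grid):
--     h = len(grid)
--     w = len(grid[0]) if h else 0
--     return h, w
--
-- def row_is_uniform(row):
--     return len(set(row)) == 1
--
-- def find_uniform_rows(grid):
--     rows = []
--     for r, row in enumerate(grid):
--         if row_is_uniform(row):
--             rows.append(r)
--     return rows
--
-- def split_into_row_bands(grid):
--     """
--     Use full uniform rows as separators.
--     Returns list of (start_row, end_row) for non-uniform bands.
--     """
--     h, _ = grid_shape(grid)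
--     uniform_rows = set(find_uniform_rows(grid))
--
--     bands = []
--     start = None
--
--     for r in range(h):
--         if r not in uniform_rows:
--             if start is None:
--                 start = r
--         else:
--             if start is not None:
--                 bands.append((start, r - 1))
--                 start = None
--
--     if start is not None:
--         bands.append((start, h - 1))
--
--     return bands
-- ===== SOURCE B (Python) =====
-- def split_into_row_bands(grid):
--     h = len(grid)
--     uniform = [r for r, row in enumerate(grid) if len(set(row)) == 1]
--     seps = [-1] + uniform + [h]
--     bands = []
--     for a, b in zip(seps, seps[1:]):
--         if b - a > 1:
--             bands.append((a + 1, b - 1))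
--     return bands
-- ===== Notes on version B (the rewrite author's own statement) =====
-- stated objective: simpler
-- what changed: Replaces the start/None state machine scanning every row by forming separators [-1]+uniform_row_indices+[h] and emitting the gap between each consecutive separator pair as a band.
import Mathlib
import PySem

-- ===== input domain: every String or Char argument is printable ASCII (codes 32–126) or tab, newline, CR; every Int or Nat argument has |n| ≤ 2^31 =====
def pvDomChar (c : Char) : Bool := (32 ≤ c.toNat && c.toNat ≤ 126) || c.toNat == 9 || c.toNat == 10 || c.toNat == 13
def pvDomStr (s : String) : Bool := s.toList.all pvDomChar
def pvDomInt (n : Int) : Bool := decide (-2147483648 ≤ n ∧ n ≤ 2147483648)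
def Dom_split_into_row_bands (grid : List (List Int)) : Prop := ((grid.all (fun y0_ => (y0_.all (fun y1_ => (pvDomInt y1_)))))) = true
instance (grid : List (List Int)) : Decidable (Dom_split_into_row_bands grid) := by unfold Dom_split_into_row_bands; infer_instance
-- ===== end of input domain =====

-- B replaces A's start/None row-scanning state machine by gaps between consecutive
-- separator indices ([-1] + uniform row indices + [h]); objective: simpler.

-- ===== PORT A =====
def grid_shape (grid : List (List Int)) : Int × Int :=
  let h : Int := grid.length
  let w : Int := if h ≠ 0 then ((PySem.List.pyGetD grid 0 []).length : Int) else 0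
  (h, w)

def row_is_uniform (row : List Int) : Bool :=
  (PySem.Set.ofList row).length == 1

def find_uniform_rows (grid : List (List Int)) : List Int :=
  (PySem.List.enumerate grid 0).foldl
    (fun rows rr => if row_is_uniform rr.2 then rows ++ [rr.1] else rows) []

def split_into_row_bands (grid : List (List Int)) : List (Int × Int) :=
  let h := (grid_shape grid).1
  let uniform_rows : PySem.Set Int := PySem.Set.ofList (find_uniform_rows grid)
  let res := (PySem.List.pyRange 0 h 1).foldl
    (fun (st : List (Int × Int) × Option Int) r =>
      if !(PySem.Set.contains uniform_rows r) then
        match st.2 with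
        | none => (st.1, some r)
        | some _ => st
      else
        match st.2 with
        | some s => (st.1 ++ [(s, r - 1)], none)
        | none => st)
    ([], none)
  match res.2 with
  | some s => res.1 ++ [(s, h - 1)]
  | none => res.1

-- ===== PORT B =====
def split_into_row_bands_alt (grid : List (List Int)) : List (Int × Int) :=
  let h : Int := grid.length
  let uniform : List Int :=
    ((PySem.List.enumerate grid 0).filter
      (fun rr => (PySem.Set.ofList rr.2).length == 1)).map (·.1)
  let seps : List Int := [-1] ++ uniform ++ [h]
  (seps.zip seps.tail).foldl
    (fun bands ab => if ab.2 - ab.1 > 1 then bands ++ [(ab.1 + 1, ab.2 - 1)] else bands) []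

-- ===== PRECONDITION & SPEC =====
def Spec_split_into_row_bands (grid : List (List Int)) (out : List (Int × Int)) : Prop := out = split_into_row_bands_alt grid
instance (grid : List (List Int)) (out : List (Int × Int)) : Decidable (Spec_split_into_row_bands grid out) := by unfold Spec_split_into_row_bands; infer_instance

-- ===== CLAIM (what is proved, stated in full; the proofs are below) =====
def Claim_equal_split_into_row_bands : Prop := ∀ (grid : List (List Int)), Dom_split_into_row_bands grid → Spec_split_into_row_bands grid (split_into_row_bands grid)

-- ===== LEMMAS AND PROOFS =====

-- canonical scan over the per-row uniformity flags (A's state machine, recursively)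
def pvScan (r : Int) (start : Option Int) : List Bool → List (Int × Int)
  | [] => match start with | some s => [(s, r - 1)] | none => []
  | f :: fs =>
    if f then
      match start with
      | some s => (s, r - 1) :: pvScan (r + 1) none fs
      | none => pvScan (r + 1) none fs
    else
      match start with
      | some s => pvScan (r + 1) (some s) fs
      | none => pvScan (r + 1) (some r) fs

-- indices (from r) whose flag is true
def pvUidx (r : Int) : List Bool → List Int
  | [] => []
  | f :: fs => if f then r :: pvUidx (r + 1) fs else pvUidx (r + 1) fs

-- B's gap computation, recursively
def pvGap (a : Int) : List Int → Int → List (Int × Int)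
  | [], H => if H - a > 1 then [(a + 1, H - 1)] else []
  | b :: rest, H => (if b - a > 1 then [(a + 1, b - 1)] else []) ++ pvGap b rest H

theorem pvUidx_ge (fs : List Bool) : ∀ (r x : Int), x ∈ pvUidx r fs → r ≤ x := by
  induction fs with
  | nil => intro r x h; simp [pvUidx] at h
  | cons f fs ih =>
    intro r x h
    simp only [pvUidx] at h
    split at h
    · rcases List.mem_cons.mp h with h | h
      · omega
      · have := ih (r + 1) x h; omega
    · have := ih (r + 1) x h; omega

theorem pvUidx_mem (fs : List Bool) : ∀ (r : Int) (i : Nat), i < fs.length →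
    (((r + i) ∈ pvUidx r fs) ↔ fs.getD i false = true) := by
  induction fs with
  | nil => intro r i hi; simp at hi
  | cons f fs ih =>
    intro r i hi
    simp only [pvUidx]
    cases i with
    | zero =>
      simp only [List.getD_cons_zero, Int.natCast_zero, Int.add_zero]
      cases f with
      | true => simp
      | false =>
        simp only [Bool.false_eq_true, if_false, iff_false]
        intro h
        have := pvUidx_ge fs (r + 1) r h
        omega
    | succ j =>
      have hj : j < fs.length := by simpa using hi
      have key : r + ((j : Int) + 1) = (r + 1) + j := by ring
      have := ih (r + 1) j hj
      split
      · simp only [List.mem_cons, List.getD_cons_succ]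
        constructor
        · rintro (h | h)
          · omega
          · exact this.mp (by rw [← key]; exact_mod_cast h)
        · intro h; right
          have := this.mpr h
          rw [show ((r : Int) + (↑(j + 1) : Int)) = (r + 1) + j by push_cast; ring]
          exact this
      · simp only [List.getD_cons_succ]
        rw [show ((r : Int) + (↑(j + 1) : Int)) = (r + 1) + j by push_cast; ring]
        exact this

theorem pvFind_eq (gs : List (List Int)) : ∀ (s : Int) (acc : List Int),
    (PySem.List.enumerate gs s).foldl
      (fun rows rr => if row_is_uniform rr.2 then rows ++ [rr.1] else rows) acc
    = acc ++ pvUidx s (gs.map row_is_uniform) := by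
  induction gs with
  | nil => intro s acc; simp [PySem.List.enumerate_nil, pvUidx]
  | cons g gs ih =>
    intro s acc
    rw [PySem.List.enumerate_cons]
    simp only [List.foldl_cons, List.map_cons, pvUidx]
    by_cases hu : row_is_uniform g
    · simp [hu, ih]
    · simp [hu, ih]

theorem pvFilterMap_eq (gs : List (List Int)) : ∀ (s : Int),
    ((PySem.List.enumerate gs s).filter
      (fun rr => (PySem.Set.ofList rr.2).length == 1)).map (·.1)
    = pvUidx s (gs.map row_is_uniform) := by
  induction gs with
  | nil => intro s; simp [PySem.List.enumerate_nil, pvUidx]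
  | cons g gs ih =>
    intro s
    rw [PySem.List.enumerate_cons]
    simp only [List.filter_cons, List.map_cons, pvUidx, row_is_uniform]
    by_cases hu : ((PySem.Set.ofList g).length == 1) = true
    · simp [hu, ih]
    · simp [hu, ih]

theorem pvLA (fs : List Bool) : ∀ (r : Int) (start : Option Int) (acc : List (Int × Int))
    (S : PySem.Set Int),
    (∀ i : Nat, i < fs.length → (PySem.Set.contains S (r + i) = fs.getD i false)) →
    (let res := (PySem.List.pyRange r (r + fs.length) 1).foldl
      (fun (st : List (Int × Int) × Option Int) x =>
        if !(PySem.Set.contains S x) then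
          match st.2 with
          | none => (st.1, some x)
          | some _ => st
        else
          match st.2 with
          | some s => (st.1 ++ [(s, x - 1)], none)
          | none => st)
      (acc, start)
     match res.2 with
     | some s => res.1 ++ [(s, r + fs.length - 1)]
     | none => res.1) = acc ++ pvScan r start fs := by
  induction fs with
  | nil =>
    intro r start acc S _
    simp only [List.length_nil, Int.natCast_zero, Int.add_zero,
      PySem.List.pyRange_one_eq_nil (le_refl r), List.foldl_nil, pvScan]
    cases start <;> simp
  | cons f fs ih =>
    intro r start acc S hS
    have h0 : PySem.Set.contains S r = f := by
      have := hS 0 (by simp)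
      simpa using this
    have hlt : r < r + (f :: fs).length := by
      simp only [List.length_cons]; push_cast; omega
    rw [PySem.List.pyRange_one_cons hlt]
    have hcast : r + ((f :: fs).length : Int) = (r + 1) + (fs.length : Int) := by
      simp only [List.length_cons]; push_cast; ring
    have hS' : ∀ i : Nat, i < fs.length →
        (PySem.Set.contains S ((r + 1) + i) = fs.getD i false) := by
      intro i hi
      have := hS (i + 1) (by simp; omega)
      rw [show (r : Int) + (↑(i + 1) : Int) = (r + 1) + i by push_cast; ring] at this
      simpa using this
    simp only [List.foldl_cons, hcast, h0, pvScan]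
    cases f with
    | true =>
      cases start with
      | none =>
        simpa using ih (r + 1) none acc S hS'
      | some s =>
        have := ih (r + 1) none (acc ++ [(s, r - 1)]) S hS'
        simpa [List.append_assoc] using this
    | false =>
      cases start with
      | none =>
        simpa using ih (r + 1) (some r) acc S hS'
      | some s =>
        simpa using ih (r + 1) (some s) acc S hS'

theorem pvLB (u : List Int) : ∀ (a H : Int) (acc : List (Int × Int)),
    ((a :: (u ++ [H])).zip (u ++ [H])).foldl
      (fun bands ab => if ab.2 - ab.1 > 1 then bands ++ [(ab.1 + 1, ab.2 - 1)] else bands) acc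
    = acc ++ pvGap a u H := by
  induction u with
  | nil =>
    intro a H acc
    simp only [List.nil_append, List.zip_cons_cons, List.zip_nil_right, List.foldl_cons,
      List.foldl_nil, pvGap]
    split <;> simp
  | cons b rest ih =>
    intro a H acc
    simp only [List.cons_append, List.zip_cons_cons, List.foldl_cons, pvGap]
    by_cases hb : b - a > 1
    · simp only [hb, if_pos, ih, List.append_assoc]
    · simp [hb, ih]

theorem pvBridge (fs : List Bool) : ∀ (r a : Int), a < r →
    pvGap a (pvUidx r fs) (r + fs.length)
    = pvScan r (if a = r - 1 then none else some (a + 1)) fs := by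
  induction fs with
  | nil =>
    intro r a ha
    simp only [pvUidx, pvGap, pvScan, List.length_nil, Int.natCast_zero, Int.add_zero]
    by_cases h : a = r - 1
    · simp [h]
    · have : r - a > 1 := by omega
      simp [h, this]
  | cons f fs ih =>
    intro r a ha
    have hcast : r + ((f :: fs).length : Int) = (r + 1) + (fs.length : Int) := by
      simp only [List.length_cons]; push_cast; ring
    simp only [pvUidx, pvScan, hcast]
    cases f with
    | true =>
      simp only [if_pos]
      have ihr := ih (r + 1) r (by omega)
      rw [if_pos (by omega : (r : Int) = (r + 1) - 1)] at ihr
      simp only [pvGap]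
      rw [ihr]
      by_cases h : a = r - 1
      · rw [if_neg (by omega : ¬ ((r : Int) - a > 1)), if_pos h]
        simp
      · rw [if_pos (by omega : (r : Int) - a > 1), if_neg h]
        simp
    | false =>
      simp only [Bool.false_eq_true, if_false]
      have ihr := ih (r + 1) a (by omega)
      rw [if_neg (by omega : ¬ (a = (r + 1) - 1))] at ihr
      rw [ihr]
      by_cases h : a = r - 1
      · rw [if_pos h, show a + 1 = r by omega]
      · rw [if_neg h]

theorem split_into_row_bands_eq (grid : List (List Int)) :
    split_into_row_bands grid = split_into_row_bands_alt grid := by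
  have hfind : find_uniform_rows grid = pvUidx 0 (grid.map row_is_uniform) := by
    simpa using pvFind_eq grid 0 []
  have hA : split_into_row_bands grid = pvScan 0 none (grid.map row_is_uniform) := by
    have hS : ∀ i : Nat, i < (grid.map row_is_uniform).length →
        (PySem.Set.contains (PySem.Set.ofList (find_uniform_rows grid)) ((0 : Int) + i)
          = (grid.map row_is_uniform).getD i false) := by
      intro i hi
      rw [hfind, Int.zero_add]
      have hmem := pvUidx_mem (grid.map row_is_uniform) 0 i hi
      rw [Int.zero_add] at hmem
      by_cases h : ((i : Int)) ∈ pvUidx 0 (grid.map row_is_uniform)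
      · rw [hmem.mp h]
        simp [PySem.Set.contains, PySem.Set.mem_ofList, h]
      · have hget : (grid.map row_is_uniform).getD i false = false := by
          cases hg : (grid.map row_is_uniform).getD i false
          · rfl
          · exact absurd (hmem.mpr hg) h
        rw [hget]
        simp [PySem.Set.contains, PySem.Set.mem_ofList, h]
    have := pvLA (grid.map row_is_uniform) 0 none [] (PySem.Set.ofList (find_uniform_rows grid)) hS
    simp only [List.nil_append] at this
    rw [← this]
    simp only [split_into_row_bands, grid_shape]
    simp
  have hB : split_into_row_bands_alt grid = pvGap (-1) (pvUidx 0 (grid.map row_is_uniform)) (grid.length : Int) := by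
    simp only [split_into_row_bands_alt]
    rw [pvFilterMap_eq grid 0]
    have := pvLB (pvUidx 0 (grid.map row_is_uniform)) (-1) (grid.length : Int) []
    simpa using this
  have hbr := pvBridge (grid.map row_is_uniform) 0 (-1) (by omega)
  rw [if_pos (by omega : (-1 : Int) = 0 - 1)] at hbr
  norm_num at hbr
  rw [hA, hB]
  exact hbr.symm

-- ===== VERDICT (by name: the statement is the Claim_ definition above) =====
theorem split_into_row_bands_spec : Claim_equal_split_into_row_bands := by
  intro grid _
  unfold Spec_split_into_row_bands
  exact split_into_row_bands_eq grid
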